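-- pv_equiv track=rewrite | github.com/ZXHSunSalt/Individuals | face_from_webcam.py | Flags
-- ===== SOURCE A (Python) =====
-- def Flags(flags):
--     ture_count = 0
--     false_count = 0
--     for i in range(len(flags)):
--         if flags[i] == 'True':
--             ture_count += 1
--         else:
--             false_count += 1
--     return ture_count, false_count
-- ===== SOURCE B (Python) =====
-- def Flags(flags):
--     freq = {}
--     for f in flags:
--         freq[f] = freq.get(f, 0) + 1
--     true_count = freq.get('True', 0)
--     false_count = 0
--     for key, cnt in freq.items():
--         if key != 'True':
--             false_count += cnt
--     return true_count, false_count
-- ===== Notes on version B (the rewrite author's own statement) =====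
-- stated objective: alternative
-- what changed: Builds a frequency dictionary of all flag strings once, then reads the 'True' tally from the table and sums the counts of every other key, instead of A's index loop over the list with two running counters.
import Mathlib
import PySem

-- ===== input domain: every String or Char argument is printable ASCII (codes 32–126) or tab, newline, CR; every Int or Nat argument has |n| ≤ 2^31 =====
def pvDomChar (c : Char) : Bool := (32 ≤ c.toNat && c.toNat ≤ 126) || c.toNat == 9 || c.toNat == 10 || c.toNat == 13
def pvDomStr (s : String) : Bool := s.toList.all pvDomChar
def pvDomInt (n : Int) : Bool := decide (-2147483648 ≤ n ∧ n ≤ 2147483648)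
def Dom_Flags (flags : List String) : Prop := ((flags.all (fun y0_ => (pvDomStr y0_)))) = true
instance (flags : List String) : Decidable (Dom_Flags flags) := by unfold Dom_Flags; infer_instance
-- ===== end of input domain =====

-- B groups the flags into a frequency dictionary once and reads both tallies off the table, instead of A's index loop with two running counters (objective: alternative).

-- ===== PORT A =====
def Flags (flags : List String) : Int × Int :=
  (PySem.List.pyRange 0 (PySem.List.len flags) 1).foldl
    (fun acc i =>
      if PySem.List.pyGetD flags i "" == "True" then (acc.1 + 1, acc.2)
      else (acc.1, acc.2 + 1))
    ((0 : Int), (0 : Int))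

-- ===== PORT B =====
def Flags_alt (flags : List String) : Int × Int :=
  let freq : PySem.Dict String Int :=
    flags.foldl (fun d f => d.insert f (d.getD f 0 + 1)) PySem.Dict.empty
  let true_count : Int := freq.getD "True" 0
  let false_count : Int :=
    freq.items.foldl (fun fc p => if p.1 ≠ "True" then fc + p.2 else fc) 0
  (true_count, false_count)

-- ===== PRECONDITION & SPEC =====
def Spec_Flags (flags : List String) (out : Int × Int) : Prop := out = Flags_alt flags
instance (flags : List String) (out : Int × Int) : Decidable (Spec_Flags flags out) := by unfold Spec_Flags; infer_instance

-- ===== CLAIM =====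
def Claim_equal_Flags : Prop := ∀ (flags : List String), Dom_Flags flags → Spec_Flags flags (Flags flags)

-- ===== LEMMAS AND PROOFS =====

-- A's loop computes (count of "True", length - count of "True").
theorem flags_foldl_pair (xs : List String) (tc fc : Int) :
    xs.foldl (fun acc x => if x == "True" then (acc.1 + 1, acc.2) else (acc.1, acc.2 + 1)) (tc, fc)
      = (tc + (xs.count "True" : Int), fc + ((xs.length : Int) - (xs.count "True" : Int))) := by
  induction xs generalizing tc fc with
  | nil => simp
  | cons x xs ih =>
    simp only [List.foldl_cons, List.count_cons]
    by_cases h : x = "True"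
    · rw [if_pos (by simp [h]), ih]
      refine Prod.ext ?_ ?_ <;> (push_cast; simp [h]; try ring)
    · rw [if_neg (by simp [h]), ih]
      refine Prod.ext ?_ ?_ <;> (push_cast; simp [h]; try ring)

theorem flagsA_closed (flags : List String) :
    Flags flags = ((flags.count "True" : Int), (flags.length : Int) - (flags.count "True" : Int)) := by
  unfold Flags
  rw [PySem.List.foldl_pyRange_pyGetD flags ""
        (fun acc x => if x == "True" then (acc.1 + 1, acc.2) else (acc.1, acc.2 + 1))
        ((0 : Int), (0 : Int)) (by omega)]
  simp only [Int.toNat_zero, List.drop_zero, flags_foldl_pair]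
  simp

-- A list of 0/1 indicators over a Nodup list containing x sums to 1.
theorem sum_indicator_one (x : String) (S : List String) (hS : S.Nodup) (hx : x ∈ S) :
    (S.map (fun k => if k = x then (1 : Int) else 0)).sum = 1 := by
  induction S with
  | nil => simp at hx
  | cons s S ih =>
    have hnd := List.nodup_cons.mp hS
    rcases List.mem_cons.mp hx with h | h
    · subst h
      have hz : (S.map (fun k => if k = x then (1 : Int) else 0)).sum = 0 := by
        apply List.sum_eq_zero
        intro y hy
        rcases List.mem_map.mp hy with ⟨k, hk, rfl⟩
        rw [if_neg]
        intro he; exact hnd.1 (he ▸ hk)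
      simp [hz]
    · have hne : s ≠ x := fun he => hnd.1 (he ▸ h)
      simp [hne, ih hnd.2 h]

-- Summing l.count over a Nodup list S that contains every element of l gives l.length.
theorem sum_count_over_nodup (S : List String) (l : List String)
    (hS : S.Nodup) (hsub : ∀ x ∈ l, x ∈ S) :
    (S.map (fun k => (l.count k : Int))).sum = (l.length : Int) := by
  induction l with
  | nil => simp
  | cons x l ih =>
    have hx : x ∈ S := hsub x (List.mem_cons_self ..)
    have ihs := ih (fun y hy => hsub y (List.mem_cons_of_mem _ hy))
    have hsplit : (S.map (fun k => ((x :: l).count k : Int))).sum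
        = (S.map (fun k => (l.count k : Int))).sum
          + (S.map (fun k => (if k = x then (1 : Int) else 0))).sum := by
      rw [← List.sum_map_add]
      refine congrArg List.sum (List.map_congr_left ?_)
      intro k _
      by_cases h : k = x
      · subst h; simp
      · have h' : ¬ x = k := fun he => h he.symm
        simp [h, h']
    rw [hsplit, ihs, sum_indicator_one x S hS hx]
    push_cast [List.length_cons]; ring

-- B's second loop over the frequency table sums the counts of the non-"True" keys.
theorem flagsB_closed (flags : List String) :
    Flags_alt flags = ((flags.count "True" : Int), (flags.length : Int) - (flags.count "True" : Int)) := by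
  unfold Flags_alt
  rw [PySem.Dict.foldl_insert_getD_add_one_eq_counter]
  refine Prod.ext ?_ ?_
  · simp [PySem.Dict.getD_counter]
  · show (PySem.Dict.counter flags).items.foldl
        (fun fc p => if p.1 ≠ "True" then fc + p.2 else fc) 0
      = (flags.length : Int) - (flags.count "True" : Int)
    rw [PySem.Dict.items_counter]
    have hfold : ∀ (ks : List String) (a : Int),
        (ks.map (fun k => (k, (flags.count k : Int)))).foldl
          (fun fc p => if p.1 ≠ "True" then fc + p.2 else fc) a
        = a + ((ks.filter (fun k => k ≠ "True")).map (fun k => (flags.count k : Int))).sum := by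
      intro ks
      induction ks with
      | nil => intro a; simp
      | cons k ks ih =>
        intro a
        by_cases h : k = "True"
        · subst h
          simp only [List.map_cons, List.foldl_cons]
          rw [if_neg (by simp), ih]
          simp
        · simp only [List.map_cons, List.foldl_cons]
          rw [if_pos (by simp [h]), ih]
          simp [h]
          ring
    rw [hfold]
    have hnd : (PySem.Set.ofList flags).Nodup := PySem.Set.nodup_ofList flags
    have hndf : ((PySem.Set.ofList flags).filter (fun k => k ≠ "True")).Nodup := hnd.filter _
    have hcnt : ∀ k ∈ (PySem.Set.ofList flags).filter (fun k => k ≠ "True"),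
        ((flags.count k : Int)) = (((flags.filter (fun x => x ≠ "True")).count k : Int)) := by
      intro k hk
      have hkne : k ≠ "True" := by
        have := List.of_mem_filter hk; simpa using this
      rw [List.count_filter]
      simp [hkne]
    rw [List.map_congr_left hcnt]
    have hsub : ∀ x ∈ flags.filter (fun x => x ≠ "True"),
        x ∈ (PySem.Set.ofList flags).filter (fun k => k ≠ "True") := by
      intro x hx
      have hxm := List.mem_of_mem_filter hx
      have hxp := List.of_mem_filter hx
      exact List.mem_filter.mpr ⟨(PySem.Set.mem_ofList ..).mpr hxm, hxp⟩
    rw [sum_count_over_nodup _ _ hndf hsub]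
    have h2 := List.length_eq_length_filter_add (l := flags) (fun x => decide (x ≠ "True"))
    have h1 : flags.count "True" = (flags.filter (fun x => !decide (x ≠ "True"))).length := by
      rw [← List.countP_eq_length_filter]
      unfold List.count
      refine List.countP_congr ?_
      intro x _
      by_cases h : x = "True" <;> simp [h]
    have hle : flags.count "True" ≤ flags.length := List.count_le_length
    have h3 : (flags.filter (fun x => x ≠ "True")).length
        = flags.length - flags.count "True" := by omega
    rw [show (flags.filter (fun x => x ≠ "True")) = flags.filter (fun x => decide (x ≠ "True")) from rfl, h3]
    push_cast [hle]
    ring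

-- ===== VERDICT =====
theorem Flags_spec : Claim_equal_Flags := by
  intro flags _
  show Flags flags = Flags_alt flags
  rw [flagsA_closed, flagsB_closed]
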